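-- pv_equiv track=rewrite | github.com/yarayehiaa/HackTrick2024 | Solvers/DES.py | shift_the_C0D0
-- ===== SOURCE A (Python) =====
-- number_left_shifts = [1,1,2,2,2,2,2,2,1,2,2,2,2,2,2,1]
--
-- def shift_the_C0D0(C0,D0):
--     C=[]
--     D=[]
--     C.append(C0)
--     D.append(D0)
--
--     for i in number_left_shifts:
--         current_C = C[-1]
--         current_D = D[-1]
--         next_C = current_C[i:]+current_C[:i]
--         next_D = current_D[i:]+current_D[:i]
--         C.append(next_C)
--         D.append(next_D)
--     return C , D
-- ===== SOURCE B (Python) =====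
-- # Derives each rotation directly from C0/D0 via precomputed cumulative shift offsets
-- # (prefix sums of number_left_shifts), instead of chaining each element from the previous one.
-- number_left_shifts = [1,1,2,2,2,2,2,2,1,2,2,2,2,2,2,1]
--
-- cum_offsets = [0, 1, 2, 4, 6, 8, 10, 12, 14, 15, 17, 19, 21, 23, 25, 27, 28]
--
-- def _rot(xs, s):
--     n = len(xs)
--     off = s % n if n else 0
--     return xs[off:] + xs[:off]
--
-- def shift_the_C0D0(C0, D0):
--     return [_rot(C0, s) for s in cum_offsets], [_rot(D0, s) for s in cum_offsets]
-- ===== Notes on version B (the rewrite author's own statement) =====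
-- stated objective: alternative
-- what changed: B replaces A's chained fold (each entry rotated from the previous one, appended to growing lists) by a direct map over the precomputed cumulative shift offsets, computing every entry independently from C0/D0 via a modular rotation.
import Mathlib
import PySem

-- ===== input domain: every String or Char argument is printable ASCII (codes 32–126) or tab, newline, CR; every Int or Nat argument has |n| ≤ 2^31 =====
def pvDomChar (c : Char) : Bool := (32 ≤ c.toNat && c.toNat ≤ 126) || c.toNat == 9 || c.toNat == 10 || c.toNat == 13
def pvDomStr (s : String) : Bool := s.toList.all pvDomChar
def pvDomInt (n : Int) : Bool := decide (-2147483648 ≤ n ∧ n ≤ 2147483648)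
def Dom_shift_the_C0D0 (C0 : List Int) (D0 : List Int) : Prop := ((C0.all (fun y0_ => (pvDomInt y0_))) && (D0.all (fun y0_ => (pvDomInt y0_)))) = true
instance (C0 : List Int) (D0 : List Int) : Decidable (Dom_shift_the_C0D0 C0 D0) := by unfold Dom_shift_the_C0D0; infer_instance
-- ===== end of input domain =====

-- B replaces A's chained fold by a direct map over precomputed cumulative shift offsets
-- (objective: alternative decomposition, same cost).

-- ===== PORT A =====
def number_left_shifts : List Int := [1,1,2,2,2,2,2,2,1,2,2,2,2,2,2,1]

-- loop body of A's for-loop (named for the Lean port; A writes it inline)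
def shiftStep (st : List (List Int) × List (List Int)) (i : Int) :
    List (List Int) × List (List Int) :=
  let current_C := PySem.List.pyGetD st.1 (-1) []
  let current_D := PySem.List.pyGetD st.2 (-1) []
  let next_C := PySem.List.slice current_C (some i) none ++ PySem.List.slice current_C none (some i)
  let next_D := PySem.List.slice current_D (some i) none ++ PySem.List.slice current_D none (some i)
  (st.1 ++ [next_C], st.2 ++ [next_D])

def shift_the_C0D0 (C0 : List Int) (D0 : List Int) : List (List Int) × List (List Int) :=
  number_left_shifts.foldl shiftStep ([C0], [D0])

-- ===== PORT B =====
def cum_offsets : List Int := [0, 1, 2, 4, 6, 8, 10, 12, 14, 15, 17, 19, 21, 23, 25, 27, 28]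

def rotOff (xs : List Int) (s : Int) : List Int :=
  let n : Int := xs.length
  let off : Int := if n = 0 then 0 else PySem.Int.mod s n
  PySem.List.slice xs (some off) none ++ PySem.List.slice xs none (some off)

def shift_the_C0D0_alt (C0 : List Int) (D0 : List Int) : List (List Int) × List (List Int) :=
  (cum_offsets.map (rotOff C0), cum_offsets.map (rotOff D0))

-- ===== PRECONDITION & SPEC =====
def Spec_shift_the_C0D0 (C0 : List Int) (D0 : List Int) (out : List (List Int) × List (List Int)) : Prop := out = shift_the_C0D0_alt C0 D0
instance (C0 : List Int) (D0 : List Int) (out : List (List Int) × List (List Int)) : Decidable (Spec_shift_the_C0D0 C0 D0 out) := by unfold Spec_shift_the_C0D0; infer_instance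

-- ===== CLAIM (what is proved, stated in full; the proofs are below) =====
def Claim_equal_shift_the_C0D0 : Prop := ∀ (C0 : List Int) (D0 : List Int), Dom_shift_the_C0D0 C0 D0 → Spec_shift_the_C0D0 C0 D0 (shift_the_C0D0 C0 D0)

-- ===== LEMMAS AND PROOFS =====

-- one component of A's loop body
def gstep (a : List (List Int)) (i : Int) : List (List Int) :=
  let cur := PySem.List.pyGetD a (-1) []
  a ++ [PySem.List.slice cur (some i) none ++ PySem.List.slice cur none (some i)]

lemma shiftStep_eq (st : List (List Int) × List (List Int)) (i : Int) :
    shiftStep st i = (gstep st.1 i, gstep st.2 i) := rfl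

lemma foldl_shiftStep_pair (shifts : List Int) (c d : List (List Int)) :
    shifts.foldl shiftStep (c, d) = (shifts.foldl gstep c, shifts.foldl gstep d) := by
  induction shifts generalizing c d with
  | nil => rfl
  | cons i rest ih => simp only [List.foldl_cons, shiftStep_eq]; exact ih _ _

-- stepping a rotation by a small slice-shift is rotating further
lemma step_rot (X : List Int) (s : Nat) (i : Int) (hi : i = 1 ∨ i = 2) :
    PySem.List.slice (X.rotate s) (some i) none ++
      PySem.List.slice (X.rotate s) none (some i) = X.rotate (s + i.toNat) := by
  have h1 : 1 ≤ i.toNat := by rcases hi with h | h <;> simp [h]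
  have hcast : (i.toNat : Int) = i := by rcases hi with h | h <;> simp [h]
  rw [← hcast, PySem.List.slice_from_natCast, PySem.List.slice_to_natCast]
  set j := i.toNat with hj
  have h2 : j ≤ 2 := by rcases hi with h | h <;> simp [hj, h]
  by_cases hle : j ≤ (X.rotate s).length
  · rw [← List.rotate_eq_drop_append_take hle, List.rotate_rotate]; simp
  · have hlen : X.length ≤ 1 := by rw [List.length_rotate] at hle; omega
    match X, hlen with
    | [], _ => simp
    | [a], _ =>
      simp only [List.rotate_singleton]
      rw [List.drop_of_length_le (by simpa using h1), List.take_of_length_le (by simpa using h1)]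
      simp

-- cumulative offsets of a shift list
def offs (s : Nat) : List Int → List Nat
  | [] => [s]
  | i :: rest => s :: offs (s + i.toNat) rest

lemma chain (shifts : List Int) (hsh : ∀ i ∈ shifts, i = 1 ∨ i = 2) (X : List Int) :
    ∀ (acc : List (List Int)) (s : Nat),
      shifts.foldl gstep (acc ++ [X.rotate s]) = acc ++ (offs s shifts).map (X.rotate ·) := by
  induction shifts with
  | nil => intro acc s; simp [offs]
  | cons i rest ih =>
    intro acc s
    have hi : i = 1 ∨ i = 2 := hsh i (by simp)
    simp only [List.foldl_cons, gstep, PySem.List.pyGetD_neg_one_append_singleton]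
    rw [step_rot X s i hi,
      ih (fun j hj => hsh j (by simp [hj])) (acc ++ [X.rotate s]) (s + i.toNat)]
    simp [offs]

lemma rotOff_cast (X : List Int) (s : Nat) : rotOff X (s : Int) = X.rotate s := by
  by_cases h : X = []
  · subst h; simp [rotOff, PySem.List.slice]
  · have hlen : X.length ≠ 0 := by simpa using h
    simp only [rotOff, if_neg (by exact_mod_cast hlen : ((X.length : Int) ≠ 0))]
    rw [PySem.Int.mod_natCast, PySem.List.slice_from_natCast, PySem.List.slice_to_natCast]
    rw [← List.rotate_eq_drop_append_take (le_of_lt (Nat.mod_lt _ (Nat.pos_of_ne_zero hlen)))]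
    exact List.rotate_mod X s

lemma side_eq (X : List Int) :
    number_left_shifts.foldl gstep [X] = cum_offsets.map (rotOff X) := by
  have hA : number_left_shifts.foldl gstep ([] ++ [X.rotate 0]) =
      [] ++ (offs 0 number_left_shifts).map (X.rotate ·) :=
    chain number_left_shifts (by decide) X [] 0
  simp only [List.rotate_zero, List.nil_append] at hA
  rw [hA]
  have hco : cum_offsets = (offs 0 number_left_shifts).map (fun k => (k : Int)) := by decide
  rw [hco, List.map_map]
  exact List.map_congr_left (fun k _ => (rotOff_cast X k).symm)

-- ===== VERDICT (by name: the statement is the Claim_ definition above) =====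
theorem shift_the_C0D0_spec : Claim_equal_shift_the_C0D0 := by
  intro C0 D0 _
  unfold Spec_shift_the_C0D0 shift_the_C0D0 shift_the_C0D0_alt
  rw [foldl_shiftStep_pair, side_eq C0, side_eq D0]
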